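-- pv_equiv track=rewrite | github.com/bennygiardina/draw_unified | update_wta_matches_csv.py | smart_title_token
-- ===== SOURCE A (Python) =====
-- LOWERCASE_PARTICLES = {
--     "de", "del", "della", "di", "da", "dos", "das",
--     "van", "von", "der", "den", "la", "le",
-- }
--
-- def smart_title_token(token: str) -> str:
--     token = token.strip()
--     if not token:
--         return token
--
--     if "-" in token:
--         return "-".join(smart_title_token(part) for part in token.split("-"))
--
--     if "'" in token:
--         return "'".join(smart_title_token(part) for part in token.split("'"))
--
--     lower = token.lower()
--
--     # Fix McDonald / McNally / McCartney
--     if lower.startswith("mc") and len(token) > 2: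
--         return "Mc" + token[2].upper() + token[3:].lower()
--
--     if lower in LOWERCASE_PARTICLES:
--         return lower
--
--     return token[:1].upper() + token[1:].lower()
-- ===== SOURCE B (Python) =====
-- LOWERCASE_PARTICLES = {
--     "de", "del", "della", "di", "da", "dos", "das",
--     "van", "von", "der", "den", "la", "le",
-- }
--
--
-- def _core(c):
--     if not c:
--         return ""
--     lower = c.lower()
--     if lower.startswith("mc") and len(c) > 2:
--         return "Mc" + c[2].upper() + c[3:].lower()
--     if lower in LOWERCASE_PARTICLES:
--         return lower
--     return c[:1].upper() + c[1:].lower()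
--
--
-- def smart_title_token(token: str) -> str:
--     out = []
--     cur = []
--     for ch in token.strip():
--         if ch in "-'":
--             out.append(_core("".join(cur).strip()))
--             out.append(ch)
--             cur = []
--         else:
--             cur.append(ch)
--     out.append(_core("".join(cur).strip()))
--     return "".join(out)
-- ===== Notes on version B (the rewrite author's own statement) =====
-- stated objective: alternative
-- what changed: Replaced A's two-level recursion (split on '-', then recursively on "'", stripping at each call) by a single left-to-right pass over the stripped token that accumulates the current segment and flushes a core title-casing transform at each delimiter.
import Mathlib
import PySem

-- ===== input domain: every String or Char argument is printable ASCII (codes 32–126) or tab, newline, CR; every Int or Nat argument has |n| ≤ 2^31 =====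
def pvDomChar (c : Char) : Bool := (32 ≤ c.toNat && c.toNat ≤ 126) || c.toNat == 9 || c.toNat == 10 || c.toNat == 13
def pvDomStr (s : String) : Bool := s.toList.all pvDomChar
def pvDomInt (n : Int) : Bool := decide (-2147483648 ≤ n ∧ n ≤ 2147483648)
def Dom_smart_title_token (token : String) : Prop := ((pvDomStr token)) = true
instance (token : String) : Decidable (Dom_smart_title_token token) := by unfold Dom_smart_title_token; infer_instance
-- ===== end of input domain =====

-- B replaces A's two-level recursion (split on '-', then on "'", stripping at each call) by a
-- single linear pass over the stripped token that flushes a core title-casing step at each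
-- delimiter; objective: alternative (same cost, different structure). Equivalence is proved on all inputs.

-- ===== PORT A =====
def pvParticles : List (List Char) :=
  [['d','e'], ['d','e','l'], ['d','e','l','l','a'], ['d','i'], ['d','a'],
   ['d','o','s'], ['d','a','s'], ['v','a','n'], ['v','o','n'], ['d','e','r'],
   ['d','e','n'], ['l','a'], ['l','e']]

-- characterization of PySem.Chars.splitOn on a single-char separator (needed for pyA's termination)
def pvConsHead (x : List Char) : List (List Char) → List (List Char)
  | [] => [x]
  | p :: ps => (x ++ p) :: ps

def pvSpl (c : Char) : List Char → List (List Char)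
  | [] => [[]]
  | a :: t => if a = c then [] :: pvSpl c t else pvConsHead [a] (pvSpl c t)

theorem pvSpl_ne_nil (c : Char) (t : List Char) : pvSpl c t ≠ [] := by
  cases t with
  | nil => simp [pvSpl]
  | cons a t =>
    simp only [pvSpl]
    split
    · simp
    · cases h : pvSpl c t <;> simp [pvConsHead]

theorem pvConsHead_append (x y : List Char) (ps : List (List Char)) :
    pvConsHead (x ++ y) ps = pvConsHead x (pvConsHead y ps) := by
  cases ps <;> simp [pvConsHead]

theorem pvGo_spec (c : Char) : ∀ fuel l cur acc, l.length < fuel →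
    PySem.Chars.splitOn.go [c] fuel l cur acc = acc.reverse ++ pvConsHead cur.reverse (pvSpl c l) := by
  intro fuel
  induction fuel with
  | zero => intro l cur acc h; omega
  | succ fuel ih =>
    intro l cur acc h
    cases l with
    | nil =>
      simp [PySem.Chars.splitOn.go, pvSpl, pvConsHead]
    | cons a rest =>
      by_cases hac : a = c
      · subst hac
        have hpre : List.isPrefixOf [a] (a :: rest) = true := by
          simp [List.isPrefixOf]
        rw [PySem.Chars.splitOn.go]
        simp only [hpre, if_pos, List.length_cons, List.length_nil, List.drop_succ_cons, List.drop_zero]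
        rw [ih rest [] (cur.reverse :: acc) (by simpa using Nat.lt_of_succ_lt_succ h)]
        have hne := pvSpl_ne_nil a rest
        cases hsp : pvSpl a rest with
        | nil => exact absurd hsp hne
        | cons q qs =>
          simp [pvSpl, pvConsHead, hsp]
      · have hpre : List.isPrefixOf [c] (a :: rest) = false := by
          simp [List.isPrefixOf]
          exact fun hc => hac hc.symm
        rw [PySem.Chars.splitOn.go]
        rw [if_neg (by simp [hpre])]
        rw [ih rest (a :: cur) acc (by simpa using Nat.lt_of_succ_lt_succ h)]
        simp [pvSpl, hac, pvConsHead_append]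

theorem pvSplitOn_eq (c : Char) (s : List Char) :
    PySem.Chars.splitOn s [c] = pvSpl c s := by
  unfold PySem.Chars.splitOn
  rw [pvGo_spec c (s.length + 1) s [] [] (Nat.lt_succ_self _)]
  have hne := pvSpl_ne_nil c s
  cases hsp : pvSpl c s with
  | nil => exact absurd hsp hne
  | cons q qs => simp [pvConsHead]

theorem pvSpl_mem_length (c : Char) : ∀ (t p : List Char), p ∈ pvSpl c t →
    p.length + t.count c ≤ t.length := by
  intro t
  induction t with
  | nil => intro p hp; simp [pvSpl] at hp; simp [hp]
  | cons a t ih =>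
    intro p hp
    by_cases hac : a = c
    · subst hac
      have hp' : p = [] ∨ p ∈ pvSpl a t := by simpa [pvSpl] using hp
      rcases hp' with h | h
      · subst h
        simp [List.count_cons]
        have := List.count_le_length (l := t) (a := a)
        omega
      · have := ih p h
        simp [List.count_cons]
        omega
    · simp only [pvSpl, if_neg hac] at hp
      have hne := pvSpl_ne_nil c t
      rcases hsp : pvSpl c t with _ | ⟨q, qs⟩
      · exact absurd hsp hne
      · rw [hsp] at hp
        simp only [pvConsHead, List.mem_cons] at hp
        have hcnt : (a :: t).count c = t.count c := by
          simp [List.count_cons, hac]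
        rcases hp with h | h
        · subst h
          have := ih q (by rw [hsp]; exact List.mem_cons_self)
          simp [hcnt]; omega
        · have := ih p (by rw [hsp]; exact List.mem_cons_of_mem _ h)
          simp [hcnt]; omega

theorem pvSpl_length_lt {c : Char} {t p : List Char} (hc : c ∈ t) (hp : p ∈ pvSpl c t) :
    p.length < t.length := by
  have h1 := pvSpl_mem_length c t p hp
  have h2 : 1 ≤ t.count c := List.one_le_count_iff.mpr hc
  omega

theorem pvIsIn_singleton (c : Char) (t : List Char) :
    PySem.Chars.isIn [c] t = true ↔ c ∈ t := by
  rw [PySem.Chars.isIn_iff_infix]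
  constructor
  · intro h; exact h.mem List.mem_cons_self
  · intro h
    rcases List.mem_iff_append.mp h with ⟨s1, s2, rfl⟩
    exact ⟨s1, s2, by simp⟩

theorem pvStrip_length_le (s : List Char) : (PySem.Chars.strip s).length ≤ s.length := by
  unfold PySem.Chars.strip PySem.Chars.rstrip PySem.Chars.lstrip
  have h1 := List.length_dropWhile_le (p := PySem.Chars.isspace) (l := s)
  have h2 := List.length_dropWhile_le (p := PySem.Chars.isspace)
    (l := (List.dropWhile PySem.Chars.isspace s).reverse)
  simp at h2 ⊢
  omega

-- ===== PORT A =====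
def pyA (token : List Char) : List Char :=
  let t := PySem.Chars.strip token
  if t = [] then t
  else if PySem.Chars.isIn ['-'] t then
    PySem.Chars.join ['-'] ((PySem.Chars.splitOn t ['-']).attach.map (fun p => pyA p.1))
  else if PySem.Chars.isIn ['\''] t then
    PySem.Chars.join ['\''] ((PySem.Chars.splitOn t ['\'']).attach.map (fun p => pyA p.1))
  else
    let lower := PySem.Chars.lower t
    if PySem.Chars.startswith lower ['m','c'] ∧ 2 < t.length then
      ['M','c'] ++ PySem.Chars.upper ((t.drop 2).take 1) ++ PySem.Chars.lower (t.drop 3)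
    else if lower ∈ pvParticles then lower
    else PySem.Chars.upper (t.take 1) ++ PySem.Chars.lower (t.drop 1)
termination_by token.length
decreasing_by
  · rename_i h1 hmem
    have hc : '-' ∈ PySem.Chars.strip token := (pvIsIn_singleton _ _).mp hmem
    have hp : (p : List Char) ∈ pvSpl '-' (PySem.Chars.strip token) := by
      rw [← pvSplitOn_eq]; exact p.2
    exact Nat.lt_of_lt_of_le (pvSpl_length_lt hc hp) (pvStrip_length_le token)
  · rename_i h1 h2 hmem
    have hc : '\'' ∈ PySem.Chars.strip token := (pvIsIn_singleton _ _).mp hmem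
    have hp : (p : List Char) ∈ pvSpl '\'' (PySem.Chars.strip token) := by
      rw [← pvSplitOn_eq]; exact p.2
    exact Nat.lt_of_lt_of_le (pvSpl_length_lt hc hp) (pvStrip_length_le token)

def smart_title_token (token : String) : String := String.ofList (pyA token.toList)

-- ===== PORT B =====
def pvCore (c : List Char) : List Char :=
  if c = [] then []
  else
    let lower := PySem.Chars.lower c
    if PySem.Chars.startswith lower ['m','c'] ∧ 2 < c.length then
      ['M','c'] ++ PySem.Chars.upper ((c.drop 2).take 1) ++ PySem.Chars.lower (c.drop 3)
    else if lower ∈ pvParticles then lower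
    else PySem.Chars.upper (c.take 1) ++ PySem.Chars.lower (c.drop 1)

def pvStep (st : List (List Char) × List Char) (ch : Char) : List (List Char) × List Char :=
  if ch = '-' ∨ ch = '\'' then
    (st.1 ++ [pvCore (PySem.Chars.strip st.2), [ch]], [])
  else (st.1, st.2 ++ [ch])

def pyB (token : List Char) : List Char :=
  let st := (PySem.Chars.strip token).foldl pvStep ([], [])
  PySem.Chars.join [] (st.1 ++ [pvCore (PySem.Chars.strip st.2)])

def smart_title_token_alt (token : String) : String := String.ofList (pyB token.toList)

-- ===== PRECONDITION & SPEC ===== (A is total: no Pre_)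
def Spec_smart_title_token (token : String) (out : String) : Prop := out = smart_title_token_alt token
instance (token : String) (out : String) : Decidable (Spec_smart_title_token token out) := by unfold Spec_smart_title_token; infer_instance

-- ===== CLAIM =====
def Claim_equal_smart_title_token : Prop := ∀ (token : String), Dom_smart_title_token token → Spec_smart_title_token token (smart_title_token token)

-- ===== LEMMAS AND PROOFS =====
def pvRun : List Char → List Char → List Char
  | [], cur => pvCore (PySem.Chars.strip cur)
  | ch :: rest, cur =>
    if ch = '-' ∨ ch = '\'' then pvCore (PySem.Chars.strip cur) ++ ch :: pvRun rest []
    else pvRun rest (cur ++ [ch])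

theorem pvJoin_flatten (parts : List (List Char)) : PySem.Chars.join [] parts = parts.flatten := by
  induction parts with
  | nil => simp [PySem.Chars.join, List.intercalate]
  | cons p ps ih =>
    unfold PySem.Chars.join at *
    cases ps <;> simp_all [List.intercalate]

theorem pvFold_run (s : List Char) : ∀ out cur,
    ((s.foldl pvStep (out, cur)).1 ++ [pvCore (PySem.Chars.strip (s.foldl pvStep (out, cur)).2)]).flatten
      = out.flatten ++ pvRun s cur := by
  induction s with
  | nil => intro out cur; simp [pvRun]
  | cons ch rest ih =>
    intro out cur
    by_cases hch : ch = '-' ∨ ch = '\''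
    · simp only [List.foldl_cons, pvStep, if_pos hch]
      rw [ih]
      simp [pvRun, if_pos hch]
    · simp only [List.foldl_cons, pvStep, if_neg hch]
      rw [ih]
      simp [pvRun, if_neg hch]

theorem pyB_run (token : List Char) : pyB token = pvRun (PySem.Chars.strip token) [] := by
  unfold pyB
  rw [pvJoin_flatten]
  have h := pvFold_run (PySem.Chars.strip token) [] []
  simpa using h

theorem pvRun_append (d : Char) (hd : d = '-' ∨ d = '\'') : ∀ (x : List Char) (cur y : List Char),
    pvRun (x ++ d :: y) cur = pvRun x cur ++ d :: pvRun y [] := by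
  intro x
  induction x with
  | nil => intro cur y; simp [pvRun, if_pos hd]
  | cons ch rest ih =>
    intro cur y
    by_cases hch : ch = '-' ∨ ch = '\''
    · simp only [List.cons_append, pvRun, if_pos hch]
      rw [ih]
      simp
    · simp only [List.cons_append, pvRun, if_neg hch]
      rw [ih]

theorem pvWs_not_delim {a : Char} (h : PySem.Chars.isspace a = true) : ¬(a = '-' ∨ a = '\'') := by
  rintro (rfl | rfl) <;> simp [PySem.Chars.isspace] at h

theorem pvStrip_ws_append {w s : List Char} (h : ∀ a ∈ w, PySem.Chars.isspace a = true) :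
    PySem.Chars.strip (w ++ s) = PySem.Chars.strip s := by
  unfold PySem.Chars.strip PySem.Chars.lstrip
  rw [List.dropWhile_append]
  simp [List.dropWhile_eq_nil_iff.mpr h]

theorem pvStrip_append_ws {w s : List Char} (h : ∀ a ∈ w, PySem.Chars.isspace a = true) :
    PySem.Chars.strip (s ++ w) = PySem.Chars.strip s := by
  have hw : List.dropWhile PySem.Chars.isspace w.reverse = [] :=
    List.dropWhile_eq_nil_iff.mpr (by intro a ha; exact h a (by simpa using ha))
  by_cases hs : List.dropWhile PySem.Chars.isspace s = []
  · unfold PySem.Chars.strip PySem.Chars.lstrip PySem.Chars.rstrip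
    rw [List.dropWhile_append]
    simp only [hs, List.isEmpty_nil, if_pos]
    have hwd : List.dropWhile PySem.Chars.isspace w = [] :=
      List.dropWhile_eq_nil_iff.mpr h
    simp [hs, hwd]
  · unfold PySem.Chars.strip PySem.Chars.lstrip PySem.Chars.rstrip
    rw [List.dropWhile_append]
    have hie : (List.dropWhile PySem.Chars.isspace s).isEmpty = false := by
      simpa [List.isEmpty_iff] using hs
    rw [hie]
    simp only [Bool.false_eq_true, if_false]
    rw [List.reverse_append, List.dropWhile_append]
    simp [hw]

theorem pvSandwich (p : Char → Bool) (l : List Char) :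
    l = (List.dropWhile p l.reverse).reverse ++ (List.takeWhile p l.reverse).reverse := by
  conv_lhs => rw [← List.reverse_reverse l,
    ← List.takeWhile_append_dropWhile (p := p) (l := l.reverse)]
  rw [List.reverse_append]

theorem pvStrip_idem (s : List Char) : PySem.Chars.strip (PySem.Chars.strip s) = PySem.Chars.strip s := by
  have h1 : s = s.takeWhile PySem.Chars.isspace ++ PySem.Chars.lstrip s := by
    unfold PySem.Chars.lstrip
    exact (List.takeWhile_append_dropWhile).symm
  have h2 : PySem.Chars.lstrip s
      = PySem.Chars.strip s ++ ((PySem.Chars.lstrip s).reverse.takeWhile PySem.Chars.isspace).reverse := by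
    unfold PySem.Chars.strip PySem.Chars.rstrip
    exact pvSandwich PySem.Chars.isspace (PySem.Chars.lstrip s)
  have hw1 : ∀ a ∈ s.takeWhile PySem.Chars.isspace, PySem.Chars.isspace a = true :=
    fun a ha => List.mem_takeWhile_imp ha
  have hw2 : ∀ a ∈ ((PySem.Chars.lstrip s).reverse.takeWhile PySem.Chars.isspace).reverse,
      PySem.Chars.isspace a = true :=
    fun a ha => List.mem_takeWhile_imp (by simpa using ha)
  calc PySem.Chars.strip (PySem.Chars.strip s)
      = PySem.Chars.strip (PySem.Chars.lstrip s) := by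
        conv_rhs => rw [h2]
        rw [pvStrip_append_ws hw2]
    _ = PySem.Chars.strip s := by
        conv_rhs => rw [h1]
        rw [pvStrip_ws_append hw1]

theorem pvRun_nondelim : ∀ (z : List Char) (cur : List Char),
    (∀ a ∈ z, ¬(a = '-' ∨ a = '\'')) → pvRun z cur = pvCore (PySem.Chars.strip (cur ++ z)) := by
  intro z
  induction z with
  | nil => intro cur h; simp [pvRun]
  | cons a z ih =>
    intro cur h
    have ha : ¬(a = '-' ∨ a = '\'') := h a List.mem_cons_self
    simp only [pvRun, if_neg ha]
    rw [ih (cur ++ [a]) (fun b hb => h b (List.mem_cons_of_mem _ hb))]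
    simp

theorem pvRun_ws_cur : ∀ (s w cur : List Char), (∀ a ∈ w, PySem.Chars.isspace a = true) →
    pvRun s (w ++ cur) = pvRun s cur := by
  intro s
  induction s with
  | nil => intro w cur h; simp [pvRun, pvStrip_ws_append h]
  | cons ch rest ih =>
    intro w cur h
    by_cases hch : ch = '-' ∨ ch = '\''
    · simp only [pvRun, if_pos hch, pvStrip_ws_append h]
    · simp only [pvRun, if_neg hch]
      rw [List.append_assoc]
      exact ih w (cur ++ [ch]) h

theorem pvRun_prefix_nondelim : ∀ (w rest cur : List Char), (∀ a ∈ w, ¬(a = '-' ∨ a = '\'')) →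
    pvRun (w ++ rest) cur = pvRun rest (cur ++ w) := by
  intro w
  induction w with
  | nil => intro rest cur h; simp
  | cons a w ih =>
    intro rest cur h
    have ha : ¬(a = '-' ∨ a = '\'') := h a List.mem_cons_self
    simp only [List.cons_append, pvRun, if_neg ha]
    rw [ih rest (cur ++ [a]) (fun b hb => h b (List.mem_cons_of_mem _ hb))]
    simp

theorem pvRun_suffix_ws : ∀ (s w cur : List Char), (∀ a ∈ w, PySem.Chars.isspace a = true) →
    pvRun (s ++ w) cur = pvRun s cur := by
  intro s
  induction s with
  | nil =>
    intro w cur h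
    have hnd : ∀ a ∈ w, ¬(a = '-' ∨ a = '\'') := fun a ha => pvWs_not_delim (h a ha)
    simp only [List.nil_append]
    rw [pvRun_nondelim w cur hnd]
    simp [pvRun, pvStrip_append_ws h]
  | cons ch rest ih =>
    intro w cur h
    by_cases hch : ch = '-' ∨ ch = '\''
    · simp only [List.cons_append, pvRun, if_pos hch]
      rw [ih w [] h]
    · simp only [List.cons_append, pvRun, if_neg hch]
      exact ih w (cur ++ [ch]) h

theorem pvRun_strip (p : List Char) : pvRun (PySem.Chars.strip p) [] = pvRun p [] := by
  have h1 : p = p.takeWhile PySem.Chars.isspace ++ PySem.Chars.lstrip p := by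
    unfold PySem.Chars.lstrip
    exact (List.takeWhile_append_dropWhile).symm
  have h2 : PySem.Chars.lstrip p
      = PySem.Chars.strip p ++ ((PySem.Chars.lstrip p).reverse.takeWhile PySem.Chars.isspace).reverse := by
    unfold PySem.Chars.strip PySem.Chars.rstrip
    exact pvSandwich PySem.Chars.isspace (PySem.Chars.lstrip p)
  have hw1 : ∀ a ∈ p.takeWhile PySem.Chars.isspace, PySem.Chars.isspace a = true :=
    fun a ha => List.mem_takeWhile_imp ha
  have hw2 : ∀ a ∈ ((PySem.Chars.lstrip p).reverse.takeWhile PySem.Chars.isspace).reverse,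
      PySem.Chars.isspace a = true :=
    fun a ha => List.mem_takeWhile_imp (by simpa using ha)
  calc pvRun (PySem.Chars.strip p) []
      = pvRun (PySem.Chars.lstrip p) [] := by
        conv_rhs => rw [h2]
        rw [pvRun_suffix_ws _ _ [] hw2]
    _ = pvRun p [] := by
        conv_rhs => rw [h1]
        rw [pvRun_prefix_nondelim _ _ [] (fun a ha => pvWs_not_delim (hw1 a ha))]
        simp only [List.nil_append]
        rw [← List.append_nil (p.takeWhile PySem.Chars.isspace)]
        rw [pvRun_ws_cur _ _ [] hw1]

theorem pvSpl_intercalate (c : Char) : ∀ t : List Char, List.intercalate [c] (pvSpl c t) = t := by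
  intro t
  induction t with
  | nil => simp [pvSpl, List.intercalate]
  | cons a t ih =>
    have hne := pvSpl_ne_nil c t
    rcases hsp : pvSpl c t with _ | ⟨q, qs⟩
    · exact absurd hsp hne
    · rw [hsp] at ih
      by_cases hac : a = c
      · subst hac
        simp only [pvSpl, if_pos rfl, hsp]
        cases qs <;> simp_all [List.intercalate]
      · simp only [pvSpl, if_neg hac, hsp, pvConsHead]
        cases qs <;> simp_all [List.intercalate]

theorem pvRun_intercalate (d : Char) (hd : d = '-' ∨ d = '\'') :
    ∀ parts : List (List Char), parts ≠ [] →
    pvRun (List.intercalate [d] parts) [] = List.intercalate [d] (parts.map (fun p => pvRun p [])) := by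
  intro parts
  induction parts with
  | nil => intro h; exact absurd rfl h
  | cons q qs ih =>
    intro _
    cases qs with
    | nil => simp [List.intercalate]
    | cons r rs =>
      have hq : List.intercalate [d] (q :: r :: rs) = q ++ d :: List.intercalate [d] (r :: rs) := by
        simp [List.intercalate]
      rw [hq, pvRun_append d hd]
      rw [ih (by simp)]
      have : List.intercalate [d] ((q :: r :: rs).map (fun p => pvRun p []))
          = pvRun q [] ++ d :: List.intercalate [d] ((r :: rs).map (fun p => pvRun p [])) := by
        simp [List.intercalate]
      rw [this]

theorem pvRun_nodelim_core (t : List Char) (h2 : ¬ PySem.Chars.isIn ['-'] t = true)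
    (h3 : ¬ PySem.Chars.isIn ['\''] t = true) :
    pvRun t [] = pvCore (PySem.Chars.strip t) := by
  have hnd : ∀ a ∈ t, ¬(a = '-' ∨ a = '\'') := by
    intro a ha
    rintro (rfl | rfl)
    · exact h2 ((pvIsIn_singleton _ _).mpr ha)
    · exact h3 ((pvIsIn_singleton _ _).mpr ha)
  rw [pvRun_nondelim t [] hnd]
  simp

theorem pyA_run : ∀ token : List Char, pyA token = pvRun (PySem.Chars.strip token) [] := by
  intro token
  induction token using pyA.induct with
  | case1 x t h0 =>
    have h0' : PySem.Chars.strip x = [] := h0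
    rw [pyA, if_pos h0', h0']
    have : PySem.Chars.strip ([] : List Char) = [] := rfl
    simp [pvRun, pvCore, this]
  | case2 x t hne hin ih =>
    have hne' : ¬ PySem.Chars.strip x = [] := hne
    have hin' : PySem.Chars.isIn ['-'] (PySem.Chars.strip x) = true := hin
    have ih' : ∀ (p : { y // y ∈ PySem.Chars.splitOn (PySem.Chars.strip x) ['-'] }),
        pyA p.1 = pvRun (PySem.Chars.strip p.1) [] := ih
    rw [pyA, if_neg hne', if_pos hin']
    have h1 : ∀ p ∈ (PySem.Chars.splitOn (PySem.Chars.strip x) ['-']).attach,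
        pyA p.1 = pvRun p.1 [] := by
      intro p _
      rw [ih' p, pvRun_strip]
    rw [List.map_congr_left h1]
    have hmap : (PySem.Chars.splitOn (PySem.Chars.strip x) ['-']).attach.map
        (fun p => pvRun p.1 []) = (PySem.Chars.splitOn (PySem.Chars.strip x) ['-']).map
        (fun p => pvRun p []) := by simp
    rw [hmap, pvSplitOn_eq]
    show List.intercalate ['-'] _ = _
    rw [← pvRun_intercalate '-' (Or.inl rfl) _ (pvSpl_ne_nil _ _), pvSpl_intercalate]
  | case3 x t hne h2 hin ih =>
    have hne' : ¬ PySem.Chars.strip x = [] := hne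
    have hin' : PySem.Chars.isIn ['\''] (PySem.Chars.strip x) = true := hin
    have h2' : ¬ PySem.Chars.isIn ['-'] (PySem.Chars.strip x) = true := h2
    have ih' : ∀ (p : { y // y ∈ PySem.Chars.splitOn (PySem.Chars.strip x) ['\''] }),
        pyA p.1 = pvRun (PySem.Chars.strip p.1) [] := ih
    rw [pyA, if_neg hne', if_neg h2', if_pos hin']
    have h1 : ∀ p ∈ (PySem.Chars.splitOn (PySem.Chars.strip x) ['\'']).attach,
        pyA p.1 = pvRun p.1 [] := by
      intro p _
      rw [ih' p, pvRun_strip]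
    rw [List.map_congr_left h1]
    have hmap : (PySem.Chars.splitOn (PySem.Chars.strip x) ['\'']).attach.map
        (fun p => pvRun p.1 []) = (PySem.Chars.splitOn (PySem.Chars.strip x) ['\'']).map
        (fun p => pvRun p []) := by simp
    rw [hmap, pvSplitOn_eq]
    show List.intercalate ['\''] _ = _
    rw [← pvRun_intercalate '\'' (Or.inr rfl) _ (pvSpl_ne_nil _ _), pvSpl_intercalate]
  | case4 x t hne h2 h3 lower hmc =>
    have hne' : ¬ PySem.Chars.strip x = [] := hne
    have h2' : ¬ PySem.Chars.isIn ['-'] (PySem.Chars.strip x) = true := h2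
    have h3' : ¬ PySem.Chars.isIn ['\''] (PySem.Chars.strip x) = true := h3
    have hmc' : PySem.Chars.startswith (PySem.Chars.lower (PySem.Chars.strip x)) ['m','c'] = true
        ∧ 2 < (PySem.Chars.strip x).length := hmc
    rw [pyA, if_neg hne', if_neg h2', if_neg h3', if_pos hmc']
    rw [pvRun_nodelim_core _ h2' h3', pvStrip_idem]
    rw [pvCore, if_neg hne', if_pos hmc']
  | case5 x t hne h2 h3 lower hmc hpart =>
    have hne' : ¬ PySem.Chars.strip x = [] := hne
    have h2' : ¬ PySem.Chars.isIn ['-'] (PySem.Chars.strip x) = true := h2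
    have h3' : ¬ PySem.Chars.isIn ['\''] (PySem.Chars.strip x) = true := h3
    have hmc' : ¬ (PySem.Chars.startswith (PySem.Chars.lower (PySem.Chars.strip x)) ['m','c'] = true
        ∧ 2 < (PySem.Chars.strip x).length) := hmc
    have hpart' : PySem.Chars.lower (PySem.Chars.strip x) ∈ pvParticles := hpart
    rw [pyA, if_neg hne', if_neg h2', if_neg h3', if_neg hmc', if_pos hpart']
    rw [pvRun_nodelim_core _ h2' h3', pvStrip_idem]
    rw [pvCore, if_neg hne', if_neg hmc', if_pos hpart']
  | case6 x t hne h2 h3 lower hmc hpart =>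
    have hne' : ¬ PySem.Chars.strip x = [] := hne
    have h2' : ¬ PySem.Chars.isIn ['-'] (PySem.Chars.strip x) = true := h2
    have h3' : ¬ PySem.Chars.isIn ['\''] (PySem.Chars.strip x) = true := h3
    have hmc' : ¬ (PySem.Chars.startswith (PySem.Chars.lower (PySem.Chars.strip x)) ['m','c'] = true
        ∧ 2 < (PySem.Chars.strip x).length) := hmc
    have hpart' : ¬ PySem.Chars.lower (PySem.Chars.strip x) ∈ pvParticles := hpart
    rw [pyA, if_neg hne', if_neg h2', if_neg h3', if_neg hmc', if_neg hpart']
    rw [pvRun_nodelim_core _ h2' h3', pvStrip_idem]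
    rw [pvCore, if_neg hne', if_neg hmc', if_neg hpart']

-- ===== VERDICT =====
theorem smart_title_token_spec : Claim_equal_smart_title_token := by
  intro token _
  unfold Spec_smart_title_token smart_title_token smart_title_token_alt
  rw [pyA_run, pyB_run]
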